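-- pv_equiv track=rewrite | github.com/evelynyu007/viewing-party | viewing_party/party.py | get_most_watched_genre
-- ===== SOURCE A (Python) =====
-- def get_most_watched_genre(user_data):
--     if len(user_data["watched"]) == 0:
--         return None
--     genres = {}
--     for i in range(len(user_data["watched"])):
--         temp_genre = user_data["watched"][i]["genre"]
--         if temp_genre in genres:
--            genres[temp_genre] += 1
--         else:
--            genres[temp_genre] = 1
--     most_watched_genre = max(genres, key=genres.get)
--
--     return most_watched_genre
-- ===== SOURCE B (Python) =====
-- def get_most_watched_genre(user_data):
--     watched = user_data["watched"]
--     genres = {}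
--     for movie in watched:
--         g = movie["genre"]
--         genres[g] = genres.get(g, 0) + 1
--     if not genres:
--         return None
--     m = max(genres.values())
--     for movie in watched:
--         g = movie["genre"]
--         if genres[g] == m:
--             return g
-- ===== Notes on version B (the rewrite author's own statement) =====
-- stated objective: alternative
-- what changed: Instead of max(genres, key=genres.get) over the dict keys, B computes the plain maximum of the count values and then re-scans the original watched list in order, returning the first genre whose count equals that maximum (same tie-break, since dict key order is first-occurrence order).
import Mathlib
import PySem

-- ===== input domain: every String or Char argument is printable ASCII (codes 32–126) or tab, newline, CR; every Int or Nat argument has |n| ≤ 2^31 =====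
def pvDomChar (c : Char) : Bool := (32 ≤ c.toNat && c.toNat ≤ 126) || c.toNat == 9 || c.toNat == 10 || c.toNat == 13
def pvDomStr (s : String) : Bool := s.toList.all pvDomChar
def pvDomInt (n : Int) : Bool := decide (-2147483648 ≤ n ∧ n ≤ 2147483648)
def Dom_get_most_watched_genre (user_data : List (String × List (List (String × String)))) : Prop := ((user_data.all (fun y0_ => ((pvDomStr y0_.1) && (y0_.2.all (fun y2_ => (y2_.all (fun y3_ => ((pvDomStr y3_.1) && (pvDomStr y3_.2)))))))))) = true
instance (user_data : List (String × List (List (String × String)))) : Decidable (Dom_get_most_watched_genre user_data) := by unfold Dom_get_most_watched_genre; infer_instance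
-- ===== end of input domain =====

-- B replaces max(genres, key=genres.get) by a plain max over the count values followed by an
-- ordered re-scan of the watched list returning the first genre attaining that maximum.


-- ===== PORT A =====
def get_most_watched_genre (user_data : List (String × List (List (String × String)))) : Option String :=
  match (PySem.Dict.mk user_data).get? "watched" with
  | none => none  -- KeyError on user_data["watched"]: excluded by Pre_
  | some watched =>
    if watched.length = 0 then none
    else
      let genres : PySem.Dict String Int :=
        (PySem.List.pyRange 0 (watched.length : Int) 1).foldl
          (fun g i =>
            -- i is always in range inside 'for i in range(len(...))', so pyGetD is exact here
            match (PySem.Dict.mk (PySem.List.pyGetD watched i [])).get? "genre" with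
            | none => g  -- KeyError on movie["genre"]: excluded by Pre_
            | some temp_genre =>
              if g.contains temp_genre then g.modify temp_genre 0 (· + 1)
              else g.insert temp_genre 1)
          PySem.Dict.empty
      -- max(genres, key=genres.get): every key of genres is in genres, so genres.get k is its count
      PySem.List.max? genres.keys (fun k => genres.getD k 0)

-- ===== PORT B =====
def get_most_watched_genre_alt (user_data : List (String × List (List (String × String)))) : Option String :=
  match (PySem.Dict.mk user_data).get? "watched" with
  | none => none  -- KeyError on user_data["watched"]: excluded by Pre_
  | some watched =>
    let genres : PySem.Dict String Int :=
      watched.foldl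
        (fun g movie =>
          match (PySem.Dict.mk movie).get? "genre" with
          | none => g  -- KeyError on movie["genre"]: excluded by Pre_
          | some k => g.insert k (g.getD k 0 + 1))
        PySem.Dict.empty
    if genres.size = 0 then none
    else
      match PySem.List.max? genres.values (fun v => v) with
      | none => none  -- unreachable: genres is nonempty here
      | some m =>
        watched.findSome? (fun movie =>
          match (PySem.Dict.mk movie).get? "genre" with
          | none => none  -- KeyError on movie["genre"]: excluded by Pre_
          | some k => if genres.getD k 0 = m then some k else none)

-- ===== PRECONDITION & SPEC =====
-- Pre_ excludes exactly the inputs where the Python A raises KeyError: a missing "watched" key,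
-- or a movie in the watched list without a "genre" key.
def Pre_get_most_watched_genre (user_data : List (String × List (List (String × String)))) : Prop :=
  (match (PySem.Dict.mk user_data).get? "watched" with
   | none => false
   | some watched => watched.all (fun movie => (PySem.Dict.mk movie).contains "genre")) = true
instance (user_data : List (String × List (List (String × String)))) : Decidable (Pre_get_most_watched_genre user_data) := by unfold Pre_get_most_watched_genre; infer_instance

def pvWitness_get_most_watched_genre : (List (String × List (List (String × String)))) :=
  [("watched", [[("genre", "horror")], [("genre", "comedy")], [("genre", "horror")]])]

def Spec_get_most_watched_genre (user_data : List (String × List (List (String × String)))) (out : Option String) : Prop := out = get_most_watched_genre_alt user_data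
instance (user_data : List (String × List (List (String × String)))) (out : Option String) : Decidable (Spec_get_most_watched_genre user_data out) := by unfold Spec_get_most_watched_genre; infer_instance

-- ===== CLAIM (what is proved, stated in full; the proofs are below) =====
def Claim_equal_get_most_watched_genre : Prop := ∀ (user_data : List (String × List (List (String × String)))), Dom_get_most_watched_genre user_data → Pre_get_most_watched_genre user_data → Spec_get_most_watched_genre user_data (get_most_watched_genre user_data)

-- ===== LEMMAS AND PROOFS =====

-- the genre of a movie, once the movie is known to carry the "genre" key
def pvGenreOf (movie : List (String × String)) : String :=
  ((PySem.Dict.mk movie).get? "genre").getD ""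

-- the running strict-max fold (PySem.List.max? with a seeded accumulator) keeps the FIRST
-- element attaining the overall maximum of the key
theorem runmax_find {α : Type} (f : α → Int) :
    ∀ (t : List α) (b : α),
      t.foldl (fun acc x => match acc with
        | none => some x
        | some m => if f m < f x then some x else some m) (some b)
      = (b :: t).find? (fun x => f x = (t.map f).foldl max (f b)) := by
  intro t
  induction t with
  | nil => intro b; simp
  | cons c t ih =>
    intro b
    simp only [List.foldl_cons, List.map_cons]
    by_cases h : f b < f c
    · rw [if_pos h, ih c]
      have hK : (t.map f).foldl max (max (f b) (f c)) = (t.map f).foldl max (f c) := by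
        congr 1; omega
      simp only [hK]
      have hb : f b ≠ (t.map f).foldl max (f c) := by
        have := (PySem.List.le_foldl_max (t.map f) (f c)).1
        omega
      simp only [List.find?_cons, decide_eq_false hb]
    · rw [if_neg h, ih b]
      have hK : (t.map f).foldl max (max (f b) (f c)) = (t.map f).foldl max (f b) := by
        congr 1; omega
      simp only [hK]
      by_cases hb : f b = (t.map f).foldl max (f b)
      · simp only [List.find?_cons, decide_eq_true hb]
      · have hKb : f b ≤ (t.map f).foldl max (f b) := (PySem.List.le_foldl_max (t.map f) (f b)).1
        have hc : f c ≠ (t.map f).foldl max (f b) := by omega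
        simp only [List.find?_cons, decide_eq_false hb, decide_eq_false hc]

-- Python max(xs, key=f) on a nonempty list is the first element attaining the maximal key
theorem max?_eq_find {α : Type} (f : α → Int) (z : α) (t : List α) :
    PySem.List.max? (z :: t) f
      = (z :: t).find? (fun x => f x = (t.map f).foldl max (f z)) := by
  rw [show PySem.List.max? (z :: t) f
      = t.foldl (fun acc x => match acc with
        | none => some x
        | some m => if f m < f x then some x else some m) (some z) from rfl]
  exact runmax_find f t z

theorem find?_foldl_add {α : Type} [BEq α] [LawfulBEq α] (p : α → Bool) :
    ∀ (l s : List α),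
      (l.foldl PySem.Set.add s).find? p = ((s.find? p).orElse (fun _ => l.find? p)) := by
  intro l
  induction l with
  | nil => intro s; cases h : s.find? p <;> simp [Option.orElse, h]
  | cons x l ih =>
    intro s
    simp only [List.foldl_cons]
    rw [ih]
    by_cases hc : (PySem.Set.contains s x : Bool) = true
    · rw [show PySem.Set.add s x = s from by simp only [PySem.Set.add, hc, if_true]]
      cases hs : s.find? p with
      | some a => simp [Option.orElse]
      | none =>
        have hpx : p x = false := by
          have hx : x ∈ s := by
            simp [PySem.Set.contains] at hc; exact hc
          have := List.find?_eq_none.mp hs x hx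
          simpa using this
        simp [Option.orElse, hpx]
    · rw [show PySem.Set.add s x = s ++ [x] from by simp only [PySem.Set.add, if_neg hc]]
      rw [List.find?_append]
      cases hs : s.find? p with
      | some a => simp [Option.orElse]
      | none =>
        cases hpx : p x <;> simp [Option.orElse, hpx]

-- find? commutes with PySem's first-occurrence dedup
theorem find?_dedup {α : Type} [BEq α] [LawfulBEq α] (p : α → Bool) (l : List α) :
    (PySem.List.dedup l).find? p = l.find? p := by
  have h := find?_foldl_add p l []
  cases hl : l.find? p <;>
    simpa [PySem.List.dedup, PySem.Set.ofList, PySem.Set.empty, Option.orElse, hl] using h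

theorem findSome?_congr_mem {α β : Type} (l : List α) (f g : α → Option β)
    (h : ∀ x ∈ l, f x = g x) : l.findSome? f = l.findSome? g := by
  induction l with
  | nil => rfl
  | cons x l ih =>
    rw [List.findSome?_cons, List.findSome?_cons, h x (List.mem_cons_self),
      ih (fun y hy => h y (List.mem_cons_of_mem x hy))]

theorem findSome?_if_eq_find? {α : Type} (p : α → Prop) [DecidablePred p] (l : List α) :
    (l.findSome? (fun x => if p x then some x else none)) = l.find? (fun x => decide (p x)) := by
  induction l with
  | nil => rfl
  | cons x l ih =>
    rw [List.findSome?_cons, List.find?_cons]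
    by_cases hp : p x <;> simp [hp, ih]

-- the two counting loops build the very same dict: Counter(genre list)
theorem count_step_eq_modify {g : PySem.Dict String Int} {k : String} :
    (if g.contains k then g.modify k 0 (· + 1) else g.insert k 1) = g.modify k 0 (· + 1) := by
  by_cases hc : g.contains k = true
  · rw [if_pos hc]
  · rw [if_neg hc, show PySem.Dict.modify g k 0 (· + 1) = g.insert k (g.getD k 0 + 1) from rfl,
      PySem.Dict.getD_of_not_contains g 0 (by simpa using hc)]
    norm_num

-- ===== VERDICT (by name: the statement is the Claim_ definition above) =====
theorem get_most_watched_genre_spec : Claim_equal_get_most_watched_genre := by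
  intro ud _ hpre
  unfold Spec_get_most_watched_genre get_most_watched_genre get_most_watched_genre_alt
  unfold Pre_get_most_watched_genre at hpre
  cases hw : (PySem.Dict.mk ud).get? "watched" with
  | none => simp [hw] at hpre
  | some wd =>
    rw [hw] at hpre
    simp only [hw]
    simp only [List.all_eq_true] at hpre
    have hget : ∀ m ∈ wd, (PySem.Dict.mk m).get? "genre" = some (pvGenreOf m) := by
      intro m hm
      have hc := hpre m hm
      rw [PySem.Dict.contains_eq_isSome_get?] at hc
      cases hg : (PySem.Dict.mk m).get? "genre" with
      | none => rw [hg] at hc; simp at hc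
      | some v => simp [pvGenreOf, hg]
    -- both counting loops equal Counter(gl)
    have hA : (PySem.List.pyRange 0 (wd.length : Int) 1).foldl
        (fun (g : PySem.Dict String Int) i =>
          match (PySem.Dict.mk (PySem.List.pyGetD wd i [])).get? "genre" with
          | none => g
          | some temp_genre =>
            if g.contains temp_genre then g.modify temp_genre 0 (· + 1)
            else g.insert temp_genre 1)
        PySem.Dict.empty = PySem.Dict.counter (wd.map pvGenreOf) := by
      rw [PySem.List.foldl_pyRange_zero_pyGetD' wd []
        (fun (g : PySem.Dict String Int) movie =>
          match (PySem.Dict.mk movie).get? "genre" with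
          | none => g
          | some temp_genre =>
            if g.contains temp_genre then g.modify temp_genre 0 (· + 1)
            else g.insert temp_genre 1) PySem.Dict.empty]
      rw [PySem.List.foldl_congr_mem' wd _
        (fun (g : PySem.Dict String Int) movie => g.modify (pvGenreOf movie) 0 (· + 1))
        PySem.Dict.empty
        (by intro m hm acc; rw [hget m hm]; exact count_step_eq_modify)]
      rw [PySem.Dict.counter_eq_foldl, List.foldl_map]
    have hB : wd.foldl
        (fun (g : PySem.Dict String Int) movie =>
          match (PySem.Dict.mk movie).get? "genre" with
          | none => g
          | some k => g.insert k (g.getD k 0 + 1))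
        PySem.Dict.empty = PySem.Dict.counter (wd.map pvGenreOf) := by
      rw [PySem.List.foldl_congr_mem' wd _
        (fun (g : PySem.Dict String Int) movie => g.insert (pvGenreOf movie) (g.getD (pvGenreOf movie) 0 + 1))
        PySem.Dict.empty
        (by intro m hm acc; rw [hget m hm])]
      rw [← PySem.Dict.foldl_insert_getD_add_one_eq_counter, List.foldl_map]
    rw [hA, hB]
    set gl := wd.map pvGenreOf with hgl
    cases wd with
    | nil => rfl
    | cons w0 wrest =>
      have hglne : gl ≠ [] := by simp [hgl]
      have hdne : PySem.List.dedup gl ≠ [] := by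
        intro h
        have : pvGenreOf w0 ∈ PySem.List.dedup gl := by
          rw [PySem.List.mem_dedup]; simp [hgl]
        rw [h] at this; simp at this
      obtain ⟨z, t, hzt⟩ := List.exists_cons_of_ne_nil hdne
      -- A side
      have hlen : ¬((w0 :: wrest).length = 0) := by simp
      rw [if_neg hlen]
      rw [PySem.Dict.keys_counter, ← PySem.List.dedup_eq_ofList, hzt]
      have hkey : (fun k => (PySem.Dict.counter gl).getD k 0)
          = (fun k => ((gl.count k : Int))) := by
        funext k; exact PySem.Dict.getD_counter gl k
      rw [hkey, max?_eq_find]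
      -- B side
      have hsize : (PySem.Dict.counter gl).size = (PySem.List.dedup gl).length := by
        show (PySem.Dict.counter gl).items.length = _
        rw [PySem.Dict.items_counter, ← PySem.List.dedup_eq_ofList, List.length_map]
      have hsne : ¬((PySem.Dict.counter gl).size = 0) := by
        rw [hsize, hzt]; simp
      rw [if_neg hsne]
      have hvals : (PySem.Dict.counter gl).values
          = (z :: t).map (fun k => ((gl.count k : Int))) := by
        show (PySem.Dict.counter gl).items.map Prod.snd = _
        rw [PySem.Dict.items_counter, ← PySem.List.dedup_eq_ofList, hzt, List.map_map]
        rfl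
      rw [hvals, List.map_cons, PySem.List.max?_id_cons]
      split
      · next heq => exact absurd heq (by simp)
      · next m heq =>
        have hm : m = (t.map fun k => ((gl.count k : Int))).foldl max ((gl.count z : Int)) := by
          injection heq with h; omega
        subst hm
        rw [findSome?_congr_mem (w0 :: wrest) _
          (fun movie => if ((gl.count (pvGenreOf movie) : Int))
              = ((t.map fun k => ((gl.count k : Int))).foldl max ((gl.count z : Int)))
            then some (pvGenreOf movie) else none)
          (by
            intro m hm
            rw [hget m hm]
            show (if (PySem.Dict.counter gl).getD (pvGenreOf m) 0
                = ((t.map fun k => ((gl.count k : Int))).foldl max ((gl.count z : Int)))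
              then some (pvGenreOf m) else none) = _
            rw [show (PySem.Dict.counter gl).getD (pvGenreOf m) 0 = ((gl.count (pvGenreOf m) : Int))
              from PySem.Dict.getD_counter gl (pvGenreOf m)])]
        rw [show (w0 :: wrest).findSome? (fun movie => if ((gl.count (pvGenreOf movie) : Int))
              = ((t.map fun k => ((gl.count k : Int))).foldl max ((gl.count z : Int)))
            then some (pvGenreOf movie) else none)
          = gl.findSome? (fun k => if ((gl.count k : Int))
              = ((t.map fun k => ((gl.count k : Int))).foldl max ((gl.count z : Int)))
            then some k else none) from by rw [hgl, List.findSome?_map]; rfl]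
        rw [findSome?_if_eq_find?]
        rw [← find?_dedup _ gl, hzt]
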